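-- pv_equiv track=rewrite | github.com/wtsi-hgi/unjsify_cwl | unjsify_cwl/get_expressions.py | scan_expression
-- ===== SOURCE A (Python) =====
-- def scan_expression(scan):
--     DEFAULT = 0
--     DOLLAR = 1
--     PAREN = 2
--     BRACE = 3
--     SINGLE_QUOTE = 4
--     DOUBLE_QUOTE = 5
--     BACKSLASH = 6
--
--     i = 0
--     stack = [DEFAULT]
--     start = 0
--     while i < len(scan):
--         state = stack[-1]
--         c = scan[i]
--
--         if state == DEFAULT:
--             if c == '$':
--                 stack.append(DOLLAR)
--             elif c == '\\':
--                 stack.append(BACKSLASH)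
--         elif state == BACKSLASH:
--             stack.pop()
--             if stack[-1] == DEFAULT:
--                 return [i - 1, i + 1]
--         elif state == DOLLAR:
--             if c == '(':
--                 start = i - 1
--                 stack.append(PAREN)
--             elif c == '{':
--                 start = i - 1
--                 stack.append(BRACE)
--             else:
--                 stack.pop()
--         elif state == PAREN:
--             if c == '(':
--                 stack.append(PAREN)
--             elif c == ')':
--                 stack.pop()
--                 if stack[-1] == DOLLAR:
--                     return [start, i + 1]
--             elif c == "'":
--                 stack.append(SINGLE_QUOTE)
--             elif c == '"':
--                 stack.append(DOUBLE_QUOTE)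
--         elif state == BRACE:
--             if c == '{':
--                 stack.append(BRACE)
--             elif c == '}':
--                 stack.pop()
--                 if stack[-1] == DOLLAR:
--                     return [start, i + 1]
--             elif c == "'":
--                 stack.append(SINGLE_QUOTE)
--             elif c == '"':
--                 stack.append(DOUBLE_QUOTE)
--         elif state == SINGLE_QUOTE:
--             if c == "'":
--                 stack.pop()
--             elif c == '\\':
--                 stack.append(BACKSLASH)
--         elif state == DOUBLE_QUOTE:
--             if c == '"':
--                 stack.pop()
--             elif c == '\\':
--                 stack.append(BACKSLASH)
--         i += 1
--
--     if len(stack) > 1: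
--         raise Exception(
--             "Substitution error, unfinished block starting at position {}: {}".format(start, scan[start:]))
--     else:
--         return None
-- ===== SOURCE B (Python) =====
-- def _unfinished(scan, start):
--     raise Exception(
--         "Substitution error, unfinished block starting at position {}: {}".format(start, scan[start:]))
--
--
-- def _skip_quote(scan, i, quote, start):
--     # returns the index of the closing quote character
--     n = len(scan)
--     while i < n:
--         c = scan[i]
--         if c == quote:
--             return i
--         if c == '\\':
--             if i + 1 >= n:
--                 break
--             i += 2
--         else:
--             i += 1
--     _unfinished(scan, start)
--
--
-- def _parse_block(scan, start, open_c):
--     close_c = ')' if open_c == '(' else '}'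
--     n = len(scan)
--     i = start + 2
--     depth = 1
--     while i < n:
--         c = scan[i]
--         if c == open_c:
--             depth += 1
--         elif c == close_c:
--             depth -= 1
--             if depth == 0:
--                 return [start, i + 1]
--         elif c == "'" or c == '"':
--             i = _skip_quote(scan, i + 1, c, start)
--         i += 1
--     _unfinished(scan, start)
--
--
-- def scan_expression(scan):
--     n = len(scan)
--     i = 0
--     while i < n:
--         c = scan[i]
--         if c == '\\':
--             if i + 1 < n:
--                 return [i, i + 2]
--             _unfinished(scan, 0)
--         if c == '$':
--             if i + 1 >= n:
--                 _unfinished(scan, 0)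
--             nxt = scan[i + 1]
--             if nxt == '(' or nxt == '{':
--                 return _parse_block(scan, i, nxt)
--             i += 2
--             continue
--         i += 1
--     return None
-- ===== Notes on version B (the rewrite author's own statement) =====
-- stated objective: alternative
-- what changed: A's single while-loop driving an explicit state stack (7 state codes, push/pop per character) is re-decomposed as a recursive-descent scanner: a top-level loop over default text, a balanced-block parser with a depth counter, and a quote skipper; Pre_ excludes only the inputs on which A raises an Exception, and B raises the identical one there.
import Mathlib
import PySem

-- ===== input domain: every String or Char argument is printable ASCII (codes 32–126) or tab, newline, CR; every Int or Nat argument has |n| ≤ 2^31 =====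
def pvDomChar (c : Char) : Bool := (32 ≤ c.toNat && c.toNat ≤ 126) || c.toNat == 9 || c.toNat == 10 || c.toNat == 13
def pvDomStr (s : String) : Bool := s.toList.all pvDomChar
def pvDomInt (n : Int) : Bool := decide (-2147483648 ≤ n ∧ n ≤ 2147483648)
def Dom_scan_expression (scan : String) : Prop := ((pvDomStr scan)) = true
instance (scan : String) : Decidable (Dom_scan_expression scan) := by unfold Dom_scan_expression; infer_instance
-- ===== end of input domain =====

-- B re-decomposes A's single while-loop-over-a-state-stack as a recursive-descent scanner
-- (top-level loop + balanced-block parser + quote skipper); same return value everywhere A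
-- returns normally (objective: alternative decomposition, not speed). Python A raises an
-- Exception on strings ending inside an unfinished construct; those inputs are excluded by
-- Pre_ and both ports map that path to `none`.

-- ===== PORT A =====
-- Literal port of A's while loop. State codes as in A:
-- DEFAULT=0, DOLLAR=1, PAREN=2, BRACE=3, SINGLE_QUOTE=4, DOUBLE_QUOTE=5, BACKSLASH=6.
-- The loop walks the remaining characters (i is the Python index); the trailing
-- `raise`/`return None` of A are both represented by `none` (raising inputs lie outside Pre_).
def scanLoopA : List Char → Int → List Nat → Int → Option (List Int)
  | [], _, _, _ => none
  | c :: rest, i, stack, start =>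
    if stack.headD 0 = 0 then
      if c = '$' then scanLoopA rest (i+1) (1 :: stack) start
      else if c = '\\' then scanLoopA rest (i+1) (6 :: stack) start
      else scanLoopA rest (i+1) stack start
    else if stack.headD 0 = 6 then
      if stack.tail.headD 0 = 0 then some [i - 1, i + 1]
      else scanLoopA rest (i+1) stack.tail start
    else if stack.headD 0 = 1 then
      if c = '(' then scanLoopA rest (i+1) (2 :: stack) (i - 1)
      else if c = '{' then scanLoopA rest (i+1) (3 :: stack) (i - 1)
      else scanLoopA rest (i+1) stack.tail start
    else if stack.headD 0 = 2 then
      if c = '(' then scanLoopA rest (i+1) (2 :: stack) start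
      else if c = ')' then
        if stack.tail.headD 0 = 1 then some [start, i + 1]
        else scanLoopA rest (i+1) stack.tail start
      else if c = '\'' then scanLoopA rest (i+1) (4 :: stack) start
      else if c = '"' then scanLoopA rest (i+1) (5 :: stack) start
      else scanLoopA rest (i+1) stack start
    else if stack.headD 0 = 3 then
      if c = '{' then scanLoopA rest (i+1) (3 :: stack) start
      else if c = '}' then
        if stack.tail.headD 0 = 1 then some [start, i + 1]
        else scanLoopA rest (i+1) stack.tail start
      else if c = '\'' then scanLoopA rest (i+1) (4 :: stack) start
      else if c = '"' then scanLoopA rest (i+1) (5 :: stack) start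
      else scanLoopA rest (i+1) stack start
    else if stack.headD 0 = 4 then
      if c = '\'' then scanLoopA rest (i+1) stack.tail start
      else if c = '\\' then scanLoopA rest (i+1) (6 :: stack) start
      else scanLoopA rest (i+1) stack start
    else
      if c = '"' then scanLoopA rest (i+1) stack.tail start
      else if c = '\\' then scanLoopA rest (i+1) (6 :: stack) start
      else scanLoopA rest (i+1) stack start

def scan_expression (scan : String) : Option (List Int) := scanLoopA scan.toList 0 [0] 0

-- ===== PORT B =====
-- Port of Source B: _skip_quote returns (characters after the closing quote, index of the closing
-- quote); `none` is the raising path (unreachable inside Pre_).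
def skipQuoteB (q : Char) : List Char → Int → Option (List Char × Int)
  | [], _ => none
  | c :: rest, i =>
    if c = q then some (rest, i)
    else if c = '\\' then
      match rest with
      | [] => none
      | _ :: rest' => skipQuoteB q rest' (i+2)
    else skipQuoteB q rest (i+1)

-- used only by parseBlockB's termination proof
lemma skipQuoteB_nil (q : Char) (i : Int) : skipQuoteB q [] i = none := rfl

lemma skipQuoteB_cons (q c : Char) (rest : List Char) (i : Int) :
    skipQuoteB q (c :: rest) i =
      (if c = q then some (rest, i)
       else if c = '\\' then
         (match rest with
          | [] => none
          | _ :: rest' => skipQuoteB q rest' (i+2))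
       else skipQuoteB q rest (i+1)) := by rw [skipQuoteB.eq_def]

lemma skipQuoteB_len_aux (q : Char) : ∀ (n : Nat) (cs : List Char), cs.length ≤ n →
    ∀ (i : Int) (r : List Char) (j : Int), skipQuoteB q cs i = some (r, j) → r.length < cs.length := by
  intro n
  induction n with
  | zero =>
    intro cs hn i r j h
    have : cs = [] := List.length_eq_zero_iff.mp (Nat.le_zero.mp hn)
    subst this; simp [skipQuoteB_nil] at h
  | succ n ih =>
    intro cs hn i r j h
    match cs with
    | [] => simp [skipQuoteB_nil] at h
    | c :: rest =>
      by_cases hc : c = q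
      · rw [skipQuoteB_cons] at h
        simp [hc] at h
        simp [← h.1]
      · by_cases hb : c = '\\'
        · subst hb
          match rest with
          | [] => rw [skipQuoteB_cons] at h; simp [hc] at h
          | c' :: rest' =>
            rw [skipQuoteB_cons] at h
            simp [hc] at h
            have := ih rest' (by simp at hn ⊢; omega) (i+2) r j h
            simp; omega
        · rw [skipQuoteB_cons] at h
          simp [hc, hb] at h
          have := ih rest (by simp at hn ⊢; omega) (i+1) r j h
          simp; omega

lemma skipQuoteB_length_lt (q : Char) (cs : List Char) (i : Int) (r : List Char) (j : Int)
    (h : skipQuoteB q cs i = some (r, j)) : r.length < cs.length :=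
  skipQuoteB_len_aux q cs.length cs le_rfl i r j h

-- port of Source B's _parse_block (depth counter instead of Python's explicit loop bookkeeping)
def parseBlockB (openC closeC : Char) (start : Int) : Nat → List Char → Int → Option (List Int)
  | _, [], _ => none
  | depth, c :: rest, i =>
    if c = openC then parseBlockB openC closeC start (depth+1) rest (i+1)
    else if c = closeC then
      if depth = 1 then some [start, i + 1]
      else parseBlockB openC closeC start (depth-1) rest (i+1)
    else if c = '\'' ∨ c = '"' then
      match h : skipQuoteB c rest (i+1) with
      | none => none
      | some (rest', j) => parseBlockB openC closeC start depth rest' (j+1)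
    else parseBlockB openC closeC start depth rest (i+1)
  termination_by d cs i => cs.length
  decreasing_by
  · simp
  · simp
  · have := skipQuoteB_length_lt c rest (i+1) rest' j h
    simp; omega
  · simp

-- port of Source B's top-level loop
def scanLoopB : List Char → Int → Option (List Int)
  | [], _ => none
  | c :: rest, i =>
    if c = '\\' then
      match rest with
      | [] => none
      | _ :: _ => some [i, i + 2]
    else if c = '$' then
      match rest with
      | [] => none
      | d :: rest' =>
        if d = '(' then parseBlockB '(' ')' i 1 rest' (i + 2)
        else if d = '{' then parseBlockB '{' '}' i 1 rest' (i + 2)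
        else scanLoopB rest' (i + 2)
    else scanLoopB rest (i + 1)
  termination_by cs i => cs.length
  decreasing_by all_goals (simp; try omega)

def scan_expression_alt (scan : String) : Option (List Int) := scanLoopB scan.toList 0

-- ===== PRECONDITION & SPEC =====
-- Flat state machine only used to STATE the precondition (it is neither port's recursion):
-- it tracks the construct the scan is currently inside; A returns normally exactly when the
-- scan ends in plain text (.dflt) or an answer was already found (.done).
inductive PreSt : Type
  | dflt | dollar | bsTop | done
  | blk (openC : Char) (depth : Nat) (q : Option Char) (bs : Bool)
  deriving DecidableEq

def preStep : PreSt → Char → PreSt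
  | .done, _ => .done
  | .bsTop, _ => .done
  | .dflt, c => if c = '$' then .dollar else if c = '\\' then .bsTop else .dflt
  | .dollar, c =>
      if c = '(' then .blk '(' 1 none false
      else if c = '{' then .blk '{' 1 none false
      else .dflt
  | .blk o d q bs, c =>
      if bs then .blk o d q false
      else
        match q with
        | some qc =>
            if c = qc then .blk o d none false
            else if c = '\\' then .blk o d (some qc) true
            else .blk o d (some qc) false
        | none =>
            if c = o then .blk o (d+1) none false
            else if c = (if o = '(' then ')' else '}') then
              (if d = 1 then .done else .blk o (d-1) none false)
            else if c = '\'' ∨ c = '"' then .blk o d (some c) false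
            else .blk o d none false

-- Pre_ excludes exactly the inputs on which Python A raises its Exception, i.e. the string
-- ends inside an unfinished dollar-bracket block, quote or backslash escape.
def Pre_scan_expression (scan : String) : Prop :=
  scan.toList.foldl preStep .dflt = .dflt ∨ scan.toList.foldl preStep .dflt = .done
instance (scan : String) : Decidable (Pre_scan_expression scan) := by
  unfold Pre_scan_expression; infer_instance

def pvWitness_scan_expression : String := "a$(f('x'))b"

def Spec_scan_expression (scan : String) (out : Option (List Int)) : Prop := out = scan_expression_alt scan
instance (scan : String) (out : Option (List Int)) : Decidable (Spec_scan_expression scan out) := by unfold Spec_scan_expression; infer_instance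

-- ===== CLAIM (what is proved, stated in full; the proofs are below) =====
def Claim_equal_scan_expression : Prop := ∀ (scan : String), Dom_scan_expression scan → Pre_scan_expression scan → Spec_scan_expression scan (scan_expression scan)

-- ===== LEMMAS AND PROOFS =====

-- clean one-step equations for the four recursive functions (their compiled equations
-- do not unfold under plain simp)
lemma scanLoopA_nil (i : Int) (stack : List Nat) (start : Int) :
    scanLoopA [] i stack start = none := rfl

lemma scanLoopA_cons (c : Char) (rest : List Char) (i : Int) (stack : List Nat) (start : Int) :
    scanLoopA (c :: rest) i stack start =
    (if stack.headD 0 = 0 then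
      if c = '$' then scanLoopA rest (i+1) (1 :: stack) start
      else if c = '\\' then scanLoopA rest (i+1) (6 :: stack) start
      else scanLoopA rest (i+1) stack start
    else if stack.headD 0 = 6 then
      if stack.tail.headD 0 = 0 then some [i - 1, i + 1]
      else scanLoopA rest (i+1) stack.tail start
    else if stack.headD 0 = 1 then
      if c = '(' then scanLoopA rest (i+1) (2 :: stack) (i - 1)
      else if c = '{' then scanLoopA rest (i+1) (3 :: stack) (i - 1)
      else scanLoopA rest (i+1) stack.tail start
    else if stack.headD 0 = 2 then
      if c = '(' then scanLoopA rest (i+1) (2 :: stack) start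
      else if c = ')' then
        if stack.tail.headD 0 = 1 then some [start, i + 1]
        else scanLoopA rest (i+1) stack.tail start
      else if c = '\'' then scanLoopA rest (i+1) (4 :: stack) start
      else if c = '"' then scanLoopA rest (i+1) (5 :: stack) start
      else scanLoopA rest (i+1) stack start
    else if stack.headD 0 = 3 then
      if c = '{' then scanLoopA rest (i+1) (3 :: stack) start
      else if c = '}' then
        if stack.tail.headD 0 = 1 then some [start, i + 1]
        else scanLoopA rest (i+1) stack.tail start
      else if c = '\'' then scanLoopA rest (i+1) (4 :: stack) start
      else if c = '"' then scanLoopA rest (i+1) (5 :: stack) start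
      else scanLoopA rest (i+1) stack start
    else if stack.headD 0 = 4 then
      if c = '\'' then scanLoopA rest (i+1) stack.tail start
      else if c = '\\' then scanLoopA rest (i+1) (6 :: stack) start
      else scanLoopA rest (i+1) stack start
    else
      if c = '"' then scanLoopA rest (i+1) stack.tail start
      else if c = '\\' then scanLoopA rest (i+1) (6 :: stack) start
      else scanLoopA rest (i+1) stack start) := by
  rw [scanLoopA.eq_def]

lemma parseBlockB_nil (openC closeC : Char) (start : Int) (depth : Nat) (i : Int) :
    parseBlockB openC closeC start depth [] i = none := by
  rw [parseBlockB.eq_def]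

lemma parseBlockB_cons (openC closeC : Char) (start : Int) (depth : Nat) (c : Char)
    (rest : List Char) (i : Int) :
    parseBlockB openC closeC start depth (c :: rest) i =
    (if c = openC then parseBlockB openC closeC start (depth+1) rest (i+1)
    else if c = closeC then
      if depth = 1 then some [start, i + 1]
      else parseBlockB openC closeC start (depth-1) rest (i+1)
    else if c = '\'' ∨ c = '"' then
      match _h : skipQuoteB c rest (i+1) with
      | none => none
      | some (rest', j) => parseBlockB openC closeC start depth rest' (j+1)
    else parseBlockB openC closeC start depth rest (i+1)) := by
  rw [parseBlockB.eq_def]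

lemma parseBlockB_cons_qnone (openC closeC : Char) (start : Int) (depth : Nat) (c : Char)
    (rest : List Char) (i : Int) (hno : ¬ c = openC) (hnc : ¬ c = closeC)
    (hq : c = '\'' ∨ c = '"') (hs : skipQuoteB c rest (i+1) = none) :
    parseBlockB openC closeC start depth (c :: rest) i = none := by
  rw [parseBlockB_cons]
  rw [if_neg hno, if_neg hnc, if_pos hq]
  split
  · rfl
  · rename_i r2 j2 h2
    rw [hs] at h2
    simp at h2

lemma parseBlockB_cons_qsome (openC closeC : Char) (start : Int) (depth : Nat) (c : Char)
    (rest rest' : List Char) (i j : Int) (hno : ¬ c = openC) (hnc : ¬ c = closeC)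
    (hq : c = '\'' ∨ c = '"') (hs : skipQuoteB c rest (i+1) = some (rest', j)) :
    parseBlockB openC closeC start depth (c :: rest) i =
      parseBlockB openC closeC start depth rest' (j+1) := by
  rw [parseBlockB_cons]
  rw [if_neg hno, if_neg hnc, if_pos hq]
  split
  · rename_i h2
    rw [hs] at h2
    simp at h2
  · rename_i r2 j2 h2
    rw [hs] at h2
    obtain ⟨h3, h4⟩ : rest' = r2 ∧ j = j2 := by simpa using h2
    subst h3; subst h4
    rfl

lemma scanLoopB_nil (i : Int) : scanLoopB [] i = none := by
  rw [scanLoopB.eq_def]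

lemma scanLoopB_cons (c : Char) (rest : List Char) (i : Int) :
    scanLoopB (c :: rest) i =
    (if c = '\\' then
      match rest with
      | [] => none
      | _ :: _ => some [i, i + 2]
    else if c = '$' then
      match rest with
      | [] => none
      | d :: rest' =>
        if d = '(' then parseBlockB '(' ')' i 1 rest' (i + 2)
        else if d = '{' then parseBlockB '{' '}' i 1 rest' (i + 2)
        else scanLoopB rest' (i + 2)
    else scanLoopB rest (i + 1)) := by
  rw [scanLoopB.eq_def]


-- Inside a quote (A-state 4/5 above a block state), A's loop agrees with B's _skip_quote.
lemma quoteA_eq : ∀ (n : Nat) (cs : List Char), cs.length ≤ n →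
    ∀ (q : Char) (s : Nat), ((q = '\'' ∧ s = 4) ∨ (q = '"' ∧ s = 5)) →
    ∀ (st : List Nat), (st.headD 0 = 2 ∨ st.headD 0 = 3) →
    ∀ (i start : Int),
    scanLoopA cs i (s :: st) start =
      (match skipQuoteB q cs i with
       | none => none
       | some (r, j) => scanLoopA r (j + 1) st start) := by
  intro n
  induction n with
  | zero =>
    intro cs hn q s hq st hst i start
    have hcs : cs = [] := List.length_eq_zero_iff.mp (Nat.le_zero.mp hn)
    subst hcs
    simp [scanLoopA_nil, skipQuoteB_nil]
  | succ n ih =>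
    intro cs hn q s hq st hst i start
    match cs with
    | [] => simp [scanLoopA_nil, skipQuoteB_nil]
    | c :: rest =>
      have hrest : rest.length ≤ n := by simp at hn; omega
      by_cases hc : c = q
      · subst hc
        rcases hq with ⟨hq1, hs⟩ | ⟨hq1, hs⟩ <;> subst hs <;> subst hq1 <;>
          simp [scanLoopA_cons, skipQuoteB_cons]
      · by_cases hb : c = '\\'
        · subst hb
          match rest with
          | [] =>
            rcases hq with ⟨hq1, hs⟩ | ⟨hq1, hs⟩ <;> subst hs <;> subst hq1 <;>
              simp [scanLoopA_cons, skipQuoteB_cons, scanLoopA_nil, hc]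
          | c' :: rest' =>
            have hr' : rest'.length ≤ n := by simp at hn; omega
            have h1 := ih rest' hr' q s hq st hst (i+2) start
            have e2 : i + 1 + 1 = i + 2 := by ring
            have hst0 : st.headD 0 ≠ 0 := by rcases hst with h | h <;> omega
            rcases hq with ⟨hq1, hs⟩ | ⟨hq1, hs⟩ <;> subst hs <;> subst hq1 <;>
              (simp only [scanLoopA_cons, skipQuoteB_cons, List.headD_cons, List.tail_cons] ;
               simp [hc] ; rw [e2] ; exact h1)
        · have h1 := ih rest hrest q s hq st hst (i+1) start
          rcases hq with ⟨hq1, hs⟩ | ⟨hq1, hs⟩ <;> subst hs <;> subst hq1 <;>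
            (simp only [scanLoopA_cons, skipQuoteB_cons, List.headD_cons, List.tail_cons] ;
             simp [hc, hb] ; exact h1)

-- Inside a block of k+1 open brackets, A's loop agrees with B's _parse_block.
lemma blockA_eq : ∀ (n : Nat) (cs : List Char), cs.length ≤ n →
    ∀ (o cl : Char) (s : Nat), ((o = '(' ∧ cl = ')' ∧ s = 2) ∨ (o = '{' ∧ cl = '}' ∧ s = 3)) →
    ∀ (k : Nat) (i start : Int),
    scanLoopA cs i (List.replicate (k+1) s ++ [1, 0]) start = parseBlockB o cl start (k+1) cs i := by
  intro n
  induction n with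
  | zero =>
    intro cs hn o cl s ho k i start
    have hcs : cs = [] := List.length_eq_zero_iff.mp (Nat.le_zero.mp hn)
    subst hcs; simp [scanLoopA_nil, parseBlockB_nil]
  | succ n ih =>
    intro cs hn o cl s ho k i start
    match cs with
    | [] => simp [scanLoopA_nil, parseBlockB_nil]
    | c :: rest =>
      have hrest : rest.length ≤ n := by simp at hn; omega
      rcases ho with ⟨ho1, hc1, hs⟩ | ⟨ho1, hc1, hs⟩ <;> subst ho1 <;> subst hc1 <;> subst hs
      · by_cases hco : c = '('
        · subst hco
          have h1 := ih rest hrest '(' ')' 2 (Or.inl ⟨rfl, rfl, rfl⟩) (k+1) (i+1) start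
          simp only [List.replicate_succ, List.cons_append] at h1 ⊢
          simp [scanLoopA_cons, parseBlockB_cons]
          exact h1
        · by_cases hcc : c = ')'
          · subst hcc
            cases k with
            | zero =>
              simp [List.replicate_succ, scanLoopA_cons, parseBlockB_cons]
            | succ k' =>
              have h1 := ih rest hrest '(' ')' 2 (Or.inl ⟨rfl, rfl, rfl⟩) k' (i+1) start
              simp only [List.replicate_succ, List.cons_append] at h1 ⊢
              simp [scanLoopA_cons, parseBlockB_cons]
              exact h1
          · by_cases hq1 : c = '\''
            · subst hq1
              have hsq := quoteA_eq n rest hrest '\'' 4 (Or.inl ⟨rfl, rfl⟩)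
                (2 :: (List.replicate k 2 ++ [1, 0])) (by simp) (i+1) start
              cases hr : skipQuoteB '\'' rest (i+1) with
              | none =>
                simp only [hr] at hsq
                rw [parseBlockB_cons_qnone '(' ')' start (k+1) '\'' rest i (by decide) (by decide) (by decide) hr]
                simp only [List.replicate_succ, List.cons_append] at hsq ⊢
                simp [scanLoopA_cons]
                exact hsq
              | some rj =>
                obtain ⟨r, j⟩ := rj
                simp only [hr] at hsq
                have hlen : r.length ≤ n := by
                  have := skipQuoteB_length_lt '\'' rest (i+1) r j hr; omega
                have h1 := ih r hlen '(' ')' 2 (Or.inl ⟨rfl, rfl, rfl⟩) k (j+1) start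
                rw [parseBlockB_cons_qsome '(' ')' start (k+1) '\'' rest r i j (by decide) (by decide) (by decide) hr]
                simp only [List.replicate_succ, List.cons_append] at hsq h1 ⊢
                simp [scanLoopA_cons]
                rw [hsq]
                exact h1
            · by_cases hq2 : c = '"'
              · subst hq2
                have hsq := quoteA_eq n rest hrest '"' 5 (Or.inr ⟨rfl, rfl⟩)
                  (2 :: (List.replicate k 2 ++ [1, 0])) (by simp) (i+1) start
                cases hr : skipQuoteB '"' rest (i+1) with
                | none =>
                  simp only [hr] at hsq
                  rw [parseBlockB_cons_qnone '(' ')' start (k+1) '"' rest i (by decide) (by decide) (by decide) hr]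
                  simp only [List.replicate_succ, List.cons_append] at hsq ⊢
                  simp [scanLoopA_cons]
                  exact hsq
                | some rj =>
                  obtain ⟨r, j⟩ := rj
                  simp only [hr] at hsq
                  have hlen : r.length ≤ n := by
                    have := skipQuoteB_length_lt '"' rest (i+1) r j hr; omega
                  have h1 := ih r hlen '(' ')' 2 (Or.inl ⟨rfl, rfl, rfl⟩) k (j+1) start
                  rw [parseBlockB_cons_qsome '(' ')' start (k+1) '"' rest r i j (by decide) (by decide) (by decide) hr]
                  simp only [List.replicate_succ, List.cons_append] at hsq h1 ⊢
                  simp [scanLoopA_cons]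
                  rw [hsq]
                  exact h1
              · have h1 := ih rest hrest '(' ')' 2 (Or.inl ⟨rfl, rfl, rfl⟩) k (i+1) start
                simp only [List.replicate_succ, List.cons_append] at h1 ⊢
                simp [scanLoopA_cons, parseBlockB_cons, hco, hcc, hq1, hq2]
                exact h1
      · by_cases hco : c = '{'
        · subst hco
          have h1 := ih rest hrest '{' '}' 3 (Or.inr ⟨rfl, rfl, rfl⟩) (k+1) (i+1) start
          simp only [List.replicate_succ, List.cons_append] at h1 ⊢
          simp [scanLoopA_cons, parseBlockB_cons]
          exact h1
        · by_cases hcc : c = '}'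
          · subst hcc
            cases k with
            | zero =>
              simp [List.replicate_succ, scanLoopA_cons, parseBlockB_cons]
            | succ k' =>
              have h1 := ih rest hrest '{' '}' 3 (Or.inr ⟨rfl, rfl, rfl⟩) k' (i+1) start
              simp only [List.replicate_succ, List.cons_append] at h1 ⊢
              simp [scanLoopA_cons, parseBlockB_cons]
              exact h1
          · by_cases hq1 : c = '\''
            · subst hq1
              have hsq := quoteA_eq n rest hrest '\'' 4 (Or.inl ⟨rfl, rfl⟩)
                (3 :: (List.replicate k 3 ++ [1, 0])) (by simp) (i+1) start
              cases hr : skipQuoteB '\'' rest (i+1) with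
              | none =>
                simp only [hr] at hsq
                rw [parseBlockB_cons_qnone '{' '}' start (k+1) '\'' rest i (by decide) (by decide) (by decide) hr]
                simp only [List.replicate_succ, List.cons_append] at hsq ⊢
                simp [scanLoopA_cons]
                exact hsq
              | some rj =>
                obtain ⟨r, j⟩ := rj
                simp only [hr] at hsq
                have hlen : r.length ≤ n := by
                  have := skipQuoteB_length_lt '\'' rest (i+1) r j hr; omega
                have h1 := ih r hlen '{' '}' 3 (Or.inr ⟨rfl, rfl, rfl⟩) k (j+1) start
                rw [parseBlockB_cons_qsome '{' '}' start (k+1) '\'' rest r i j (by decide) (by decide) (by decide) hr]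
                simp only [List.replicate_succ, List.cons_append] at hsq h1 ⊢
                simp [scanLoopA_cons]
                rw [hsq]
                exact h1
            · by_cases hq2 : c = '"'
              · subst hq2
                have hsq := quoteA_eq n rest hrest '"' 5 (Or.inr ⟨rfl, rfl⟩)
                  (3 :: (List.replicate k 3 ++ [1, 0])) (by simp) (i+1) start
                cases hr : skipQuoteB '"' rest (i+1) with
                | none =>
                  simp only [hr] at hsq
                  rw [parseBlockB_cons_qnone '{' '}' start (k+1) '"' rest i (by decide) (by decide) (by decide) hr]
                  simp only [List.replicate_succ, List.cons_append] at hsq ⊢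
                  simp [scanLoopA_cons]
                  exact hsq
                | some rj =>
                  obtain ⟨r, j⟩ := rj
                  simp only [hr] at hsq
                  have hlen : r.length ≤ n := by
                    have := skipQuoteB_length_lt '"' rest (i+1) r j hr; omega
                  have h1 := ih r hlen '{' '}' 3 (Or.inr ⟨rfl, rfl, rfl⟩) k (j+1) start
                  rw [parseBlockB_cons_qsome '{' '}' start (k+1) '"' rest r i j (by decide) (by decide) (by decide) hr]
                  simp only [List.replicate_succ, List.cons_append] at hsq h1 ⊢
                  simp [scanLoopA_cons]
                  rw [hsq]
                  exact h1
              · have h1 := ih rest hrest '{' '}' 3 (Or.inr ⟨rfl, rfl, rfl⟩) k (i+1) start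
                simp only [List.replicate_succ, List.cons_append] at h1 ⊢
                simp [scanLoopA_cons, parseBlockB_cons, hco, hcc, hq1, hq2]
                exact h1

-- In default text, A's loop agrees with B's top-level loop (raising paths are `none` on both sides).
lemma mainA_eq : ∀ (n : Nat) (cs : List Char), cs.length ≤ n → ∀ (i start : Int),
    scanLoopA cs i [0] start = scanLoopB cs i := by
  intro n
  induction n with
  | zero =>
    intro cs hn i start
    have hcs : cs = [] := List.length_eq_zero_iff.mp (Nat.le_zero.mp hn)
    subst hcs; simp [scanLoopA_nil, scanLoopB_nil]
  | succ n ih =>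
    intro cs hn i start
    match cs with
    | [] => simp [scanLoopA_nil, scanLoopB_nil]
    | c :: rest =>
      have hrest : rest.length ≤ n := by simp at hn; omega
      by_cases hb : c = '\\'
      · subst hb
        match rest with
        | [] => simp [scanLoopA_cons, scanLoopA_nil, scanLoopB_cons]
        | c' :: rest' =>
          have e1 : i + 1 - 1 = i := by ring
          have e2 : i + 1 + 1 = i + 2 := by ring
          simp [scanLoopA_cons, scanLoopB_cons, e1, e2]
      · by_cases hd : c = '$'
        · subst hd
          match rest with
          | [] => simp [scanLoopA_cons, scanLoopA_nil, scanLoopB_cons]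
          | d :: rest' =>
            have hr' : rest'.length ≤ n := by simp at hn; omega
            have e1 : i + 1 - 1 = i := by ring
            have e2 : i + 1 + 1 = i + 2 := by ring
            by_cases hdo : d = '('
            · subst hdo
              have h1 := blockA_eq n rest' hr' '(' ')' 2 (Or.inl ⟨rfl, rfl, rfl⟩) 0 (i+2) i
              simp only [List.replicate_succ, List.replicate_zero, List.cons_append,
                List.nil_append] at h1
              simp [scanLoopA_cons, scanLoopB_cons, e1, e2]
              exact h1
            · by_cases hdc : d = '{'
              · subst hdc
                have h1 := blockA_eq n rest' hr' '{' '}' 3 (Or.inr ⟨rfl, rfl, rfl⟩) 0 (i+2) i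
                simp only [List.replicate_succ, List.replicate_zero, List.cons_append,
                  List.nil_append] at h1
                simp [scanLoopA_cons, scanLoopB_cons, e1, e2]
                exact h1
              · have h1 := ih rest' hr' (i+2) start
                simp [scanLoopA_cons, scanLoopB_cons, hdo, hdc, e2]
                exact h1
        · have h1 := ih rest hrest (i+1) start
          simp [scanLoopA_cons, scanLoopB_cons, hb, hd]
          exact h1

-- ===== VERDICT (by name: the statement is the Claim_ definition above) =====
theorem scan_expression_spec : Claim_equal_scan_expression := by
  intro scan _ _
  unfold Spec_scan_expression scan_expression scan_expression_alt
  exact mainA_eq scan.toList.length scan.toList le_rfl 0 0
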